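-- pv_equiv track=rewrite | github.com/ecbal/Python-Calculator | calculator.py | check_error
-- ===== SOURCE A (Python) =====
-- def check_error(arr):
--     logicalcount = 0
--     operatorcount = 0
--     numbers_count = 0
--     for l in range(0, len(arr)):
--         if arr[l] == "==" or arr[l] == ">=" or arr[l] == "<=" or arr[l] == "<" or arr[l] == ">":
--             logicalcount += 1
--         # Space Error
--         if arr[l].isnumeric():
--             numbers_count += 1
--         if arr[l].isnumeric() and l < len(arr) - 1:
--             if arr[l + 1].isnumeric():
--                 return "Error"
--         if l == len(arr) - 1:
--             if arr[l] == "**" or arr[l] == "//" or arr[l] == ">" or arr[l] == "<" or arr[l] == ">=" or arr[l] == "<=" or \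
--                     arr[l] == "*" or arr[l] == "-" or arr[l] == "+" or arr[l] == "/" or arr[l] == "%" or arr[l] == "==":
--                 return "Error"
--         if arr[l] == "**" or arr[l] == "//" or arr[l] == "*" or arr[l] == "-" or arr[l] == "+" or arr[l] == "/" or arr[
--             l] == "%" or arr[l] == ">" or arr[l] == "<" or arr[l] == ">=" or arr[l] == "<=" or arr[l] == "==":
--             operatorcount += 1
--     if logicalcount > 1:
--         return "Error"
--     if operatorcount >= numbers_count:
--         return "Error"
-- ===== SOURCE B (Python) =====
-- LOGIC = ("==", ">=", "<=", "<", ">")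
-- ARITH = ("**", "//", "*", "-", "+", "/", "%")
--
--
-- def _kind(tok):
--     """One-letter category: N number, L comparison, O arithmetic operator, X other."""
--     if tok.isnumeric():
--         return "N"
--     if tok in LOGIC:
--         return "L"
--     if tok in ARITH:
--         return "O"
--     return "X"
--
--
-- def check_error(arr):
--     # Compress the token stream into a category string; every error test becomes
--     # a pattern/count query on that string.
--     code = "".join(map(_kind, arr))
--     ops = code.count("L") + code.count("O")
--     if ("NN" in code or code.endswith(("L", "O"))
--             or code.count("L") > 1 or ops >= code.count("N")):
--         return "Error"
-- ===== Notes on version B (the rewrite author's own statement) =====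
-- stated objective: alternative
-- what changed: Classifies each token once into a one-letter category and joins them into a code string; the four error tests then become substring ('NN' in code), suffix (endswith) and character-count queries on that string, replacing A's interleaved index loop with three counters and per-iteration early returns.
import Mathlib
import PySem

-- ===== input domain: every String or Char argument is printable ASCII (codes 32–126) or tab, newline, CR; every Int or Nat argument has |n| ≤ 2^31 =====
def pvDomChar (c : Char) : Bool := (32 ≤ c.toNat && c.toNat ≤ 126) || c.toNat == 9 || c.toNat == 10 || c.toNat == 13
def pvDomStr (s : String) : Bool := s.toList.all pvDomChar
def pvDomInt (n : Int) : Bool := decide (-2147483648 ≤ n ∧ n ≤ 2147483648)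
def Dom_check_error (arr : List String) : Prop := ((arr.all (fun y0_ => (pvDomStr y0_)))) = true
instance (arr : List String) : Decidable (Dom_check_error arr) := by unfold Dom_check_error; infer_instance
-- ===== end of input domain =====

-- B classifies each token once into a one-letter category and concatenates them into a code
-- string; the error tests become substring/suffix/count queries on that string (alternative
-- decomposition, same cost). The return value is proved equal on all inputs.
-- Python `isnumeric` is ported as PySem.Str.strIsdigit (they agree on the ASCII domain above).

-- ===== PORT A =====
-- A's three or-chains of `arr[l] == …` comparisons, atom for atom in A's order
def aIsLogical (x : String) : Bool :=
  x == "==" || x == ">=" || x == "<=" || x == "<" || x == ">"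
def aIsEndOp (x : String) : Bool :=
  x == "**" || x == "//" || x == ">" || x == "<" || x == ">=" || x == "<=" ||
  x == "*" || x == "-" || x == "+" || x == "/" || x == "%" || x == "=="
def aIsOp (x : String) : Bool :=
  x == "**" || x == "//" || x == "*" || x == "-" || x == "+" || x == "/" ||
  x == "%" || x == ">" || x == "<" || x == ">=" || x == "<=" || x == "=="

-- the `for l in range(0, len(arr))` loop: counters as state, the early `return "Error"`s as
-- result, then the two final count checks; falling off the end of the Python function = `none`
def aLoop (arr : List String) (l logicalcount operatorcount numbers_count : Nat) : Option String :=
  if h : l < arr.length then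
    let x := arr[l]
    let logicalcount := if aIsLogical x then logicalcount + 1 else logicalcount
    let numbers_count := if PySem.Str.strIsdigit x then numbers_count + 1 else numbers_count
    if PySem.Str.strIsdigit x && decide (l < arr.length - 1) &&
        PySem.Str.strIsdigit (arr.getD (l + 1) "") then some "Error"  -- getD: only read when l+1 < len
    else if l == arr.length - 1 && aIsEndOp x then some "Error"
    else
      let operatorcount := if aIsOp x then operatorcount + 1 else operatorcount
      aLoop arr (l + 1) logicalcount operatorcount numbers_count
  else
    if logicalcount > 1 then some "Error"
    else if numbers_count ≤ operatorcount then some "Error"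
    else none
termination_by arr.length - l

def check_error (arr : List String) : Option String :=
  aLoop arr 0 0 0 0

-- ===== PORT B =====
def bLOGIC : List String := ["==", ">=", "<=", "<", ">"]
def bARITH : List String := ["**", "//", "*", "-", "+", "/", "%"]

-- Source B's _kind: one-letter category per token
def bKind (tok : String) : Char :=
  if PySem.Str.strIsdigit tok then 'N'
  else if bLOGIC.contains tok then 'L'
  else if bARITH.contains tok then 'O'
  else 'X'

-- Python's `"NN" in code` (two-character substring search)
def bHasNN : List Char → Bool
  | a :: b :: rest => (a == 'N' && b == 'N') || bHasNN (b :: rest)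
  | _ => false

-- Python's `code.endswith(("L", "O"))`
def bEndsLO (code : List Char) : Bool :=
  match code.getLast? with
  | some c => c == 'L' || c == 'O'
  | none => false

def check_error_alt (arr : List String) : Option String :=
  let code := arr.map bKind
  let ops := code.count 'L' + code.count 'O'
  if bHasNN code || bEndsLO code || code.count 'L' > 1 || code.count 'N' ≤ ops then
    some "Error"
  else
    none

-- ===== PRECONDITION & SPEC =====
def Spec_check_error (arr : List String) (out : Option String) : Prop := out = check_error_alt arr
instance (arr : List String) (out : Option String) : Decidable (Spec_check_error arr out) := by unfold Spec_check_error; infer_instance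

-- ===== CLAIM (what is proved, stated in full; the proofs are below) =====
def Claim_equal_check_error : Prop := ∀ (arr : List String), Dom_check_error arr → Spec_check_error arr (check_error arr)

-- ===== LEMMAS AND PROOFS =====

-- A's loop restated as structural recursion on the remaining suffix (same state, same branches)
def loopS : List String → Nat → Nat → Nat → Option String
  | [], lc, oc, nc =>
      if lc > 1 then some "Error"
      else if nc ≤ oc then some "Error"
      else none
  | x :: rest, lc, oc, nc =>
      let lc := if aIsLogical x then lc + 1 else lc
      let nc := if PySem.Str.strIsdigit x then nc + 1 else nc
      if PySem.Str.strIsdigit x && !rest.isEmpty &&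
          PySem.Str.strIsdigit (rest.headD "") then some "Error"
      else if rest.isEmpty && aIsEndOp x then some "Error"
      else loopS rest lc (if aIsOp x then oc + 1 else oc) nc

theorem aLoop_eq_loopS (arr : List String) (l lc oc nc : Nat) :
    aLoop arr l lc oc nc = loopS (arr.drop l) lc oc nc := by
  by_cases h : l < arr.length
  · have hd : arr.drop l = arr[l] :: arr.drop (l + 1) := List.drop_eq_getElem_cons h
    have hhead : (arr.drop (l + 1)).headD "" = arr.getD (l + 1) "" := by
      rcases Nat.lt_or_ge (l + 1) arr.length with h2 | h2
      · rw [List.drop_eq_getElem_cons h2]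
        simp [List.getD, List.getElem?_eq_getElem h2]
      · rw [List.drop_eq_nil_of_le h2]
        simp [List.getD, List.getElem?_eq_none_iff.2 h2]
    have hb2 : (!(l == arr.length - 1)) = decide (l < arr.length - 1) := by
      apply Bool.eq_iff_iff.mpr
      simp
      omega
    have hlast : (l == arr.length - 1) = (arr.drop (l + 1)).isEmpty := by
      apply Bool.eq_iff_iff.mpr
      simp [List.drop_eq_nil_iff]
      omega
    rw [hd, aLoop, loopS]
    simp only [dif_pos h, hhead, ← hlast, hb2]
    split_ifs <;> first | rfl | exact aLoop_eq_loopS arr (l + 1) _ _ _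
  · rw [aLoop, List.drop_eq_nil_of_le (by omega), loopS]
    simp only [dif_neg h]
termination_by arr.length - l
decreasing_by all_goals omega

-- the four-condition characterisation of A's loop
theorem loopS_char (s : List String) (lc oc nc : Nat) :
    loopS s lc oc nc =
      if (s.zip s.tail).any (fun p => PySem.Str.strIsdigit p.1 && PySem.Str.strIsdigit p.2) then
        some "Error"
      else if !s.isEmpty && aIsEndOp ((s.getLast?).getD "") then some "Error"
      else if 1 < lc + s.countP (fun x => aIsLogical x) then some "Error"
      else if nc + s.countP (fun x => PySem.Str.strIsdigit x) ≤
          oc + s.countP (fun x => aIsOp x) then some "Error"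
      else none := by
  induction s generalizing lc oc nc with
  | nil => simp [loopS]
  | cons x rest ih =>
    have hz : ((x :: rest).zip (x :: rest).tail).any
        (fun p => PySem.Str.strIsdigit p.1 && PySem.Str.strIsdigit p.2) =
        ((PySem.Str.strIsdigit x && !rest.isEmpty && PySem.Str.strIsdigit (rest.headD "")) ||
         (rest.zip rest.tail).any
           (fun p => PySem.Str.strIsdigit p.1 && PySem.Str.strIsdigit p.2)) := by
      cases rest with
      | nil => simp
      | cons y t => simp
    have hl : (!(x :: rest).isEmpty && aIsEndOp (((x :: rest).getLast?).getD "")) =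
        ((rest.isEmpty && aIsEndOp x) ||
         (!rest.isEmpty && aIsEndOp ((rest.getLast?).getD ""))) := by
      cases rest with
      | nil => simp
      | cons y t => simp [List.getLast?_cons_cons]
    have e3 : ∀ m : Nat, (if aIsLogical x then m + 1 else m) +
        rest.countP (fun z => aIsLogical z) =
        m + (x :: rest).countP (fun z => aIsLogical z) := by
      intro m; rw [List.countP_cons]; split_ifs with hx <;> omega
    have e4 : ∀ m : Nat, (if PySem.Str.strIsdigit x then m + 1 else m) +
        rest.countP (fun z => PySem.Str.strIsdigit z) =
        m + (x :: rest).countP (fun z => PySem.Str.strIsdigit z) := by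
      intro m; rw [List.countP_cons]; split_ifs with hx <;> omega
    have e5 : ∀ m : Nat, (if aIsOp x then m + 1 else m) +
        rest.countP (fun z => aIsOp z) =
        m + (x :: rest).countP (fun z => aIsOp z) := by
      intro m; rw [List.countP_cons]; split_ifs with hx <;> omega
    rw [loopS, hz, hl]
    simp only [ih, e3, e4, e5]
    cases h1 : (PySem.Str.strIsdigit x && !rest.isEmpty &&
        PySem.Str.strIsdigit (rest.headD "")) <;>
      cases h2 : (rest.isEmpty && aIsEndOp x) <;>
      cases h3 : ((rest.zip rest.tail).any
        (fun p => PySem.Str.strIsdigit p.1 && PySem.Str.strIsdigit p.2)) <;>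
      cases h4 : (!rest.isEmpty && aIsEndOp ((rest.getLast?).getD "")) <;>
      simp only [Bool.or_true, Bool.or_false, if_true, if_false, Bool.false_eq_true]

-- tokens classified L or O by bKind are never numeric
theorem logical_not_digit (x : String) (h : aIsLogical x = true) :
    PySem.Str.strIsdigit x = false := by
  simp only [aIsLogical, Bool.or_eq_true, beq_iff_eq] at h
  rcases h with (((h | h) | h) | h) | h <;> subst h <;> decide

theorem op_not_digit (x : String) (h : aIsOp x = true) :
    PySem.Str.strIsdigit x = false := by
  simp only [aIsOp, Bool.or_eq_true, beq_iff_eq] at h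
  rcases h with ((((((((((h | h) | h) | h) | h) | h) | h) | h) | h) | h) | h) | h <;>
    subst h <;> decide

theorem logical_eq_contains (x : String) : aIsLogical x = bLOGIC.contains x := by
  apply Bool.eq_iff_iff.mpr; simp [aIsLogical, bLOGIC, or_assoc]

theorem op_eq_contains (x : String) : aIsOp x = (bLOGIC.contains x || bARITH.contains x) := by
  apply Bool.eq_iff_iff.mpr
  simp only [aIsOp, bLOGIC, bARITH, Bool.or_eq_true, beq_iff_eq, List.contains_eq_mem,
    List.mem_cons, List.not_mem_nil, decide_eq_true_eq]
  tauto

theorem endOp_eq_op (x : String) : aIsEndOp x = aIsOp x := by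
  simp only [aIsEndOp, aIsOp]; ac_rfl

-- the category letters against A's predicates
theorem kind_N (x : String) : (bKind x == 'N') = PySem.Str.strIsdigit x := by
  rw [bKind]
  split_ifs with h1 h2 h3 <;> simp only [Bool.not_eq_true] at * <;> rw [h1] <;> rfl

theorem kind_L (x : String) : (bKind x == 'L') = aIsLogical x := by
  rw [bKind, ← logical_eq_contains]
  split_ifs with h1 h2 h3
  · cases hlg : aIsLogical x
    · rfl
    · rw [logical_not_digit x hlg] at h1; exact absurd h1 (by simp)
  · rw [h2]; rfl
  · simp only [Bool.not_eq_true] at h2; rw [h2]; rfl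
  · simp only [Bool.not_eq_true] at h2; rw [h2]; rfl

theorem kind_LO (x : String) : (bKind x == 'L' || bKind x == 'O') = aIsOp x := by
  rw [bKind, op_eq_contains]
  split_ifs with h1 h2 h3
  · cases hc : (bLOGIC.contains x || bARITH.contains x)
    · rfl
    · have ho : aIsOp x = true := by rw [op_eq_contains, hc]
      rw [op_not_digit x ho] at h1; exact absurd h1 (by simp)
  · rw [h2]; rfl
  · simp only [Bool.not_eq_true] at h2; rw [h2, h3]; rfl
  · simp only [Bool.not_eq_true] at h2 h3; rw [h2, h3]; rfl

-- counts on the code string = counts of A's predicates on the tokens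
theorem count_code (arr : List String) (c : Char) :
    (arr.map bKind).count c = arr.countP (fun x => bKind x == c) := by
  rw [List.count_eq_countP, List.countP_map]
  exact List.countP_congr (fun a _ => by simp [Function.comp])

theorem countP_op_split (arr : List String) :
    arr.countP (fun x => aIsOp x) =
      arr.countP (fun x => bKind x == 'L') + arr.countP (fun x => bKind x == 'O') := by
  induction arr with
  | nil => rfl
  | cons x t ih =>
    simp only [List.countP_cons, ← kind_LO x]
    by_cases h1 : bKind x = 'L' <;> by_cases h2 : bKind x = 'O' <;>
      simp [h1, h2] at * <;> omega

-- "NN" in code = the adjacent-numbers scan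
theorem hasNN_eq (arr : List String) :
    bHasNN (arr.map bKind) =
      (arr.zip arr.tail).any (fun p => PySem.Str.strIsdigit p.1 && PySem.Str.strIsdigit p.2) := by
  induction arr with
  | nil => rfl
  | cons a t ih =>
    cases t with
    | nil => rfl
    | cons b r =>
      simp only [List.map_cons, bHasNN, List.zip_cons_cons, List.tail_cons, List.any_cons]
      rw [← List.map_cons, ih]
      simp [kind_N]

-- endswith ("L","O") = last token is an operator
theorem endsLO_eq (arr : List String) :
    bEndsLO (arr.map bKind) = (!arr.isEmpty && aIsEndOp ((arr.getLast?).getD "")) := by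
  rcases List.eq_nil_or_concat arr with h | ⟨t, x, h⟩
  · subst h; rfl
  · subst h
    rw [List.concat_eq_append, List.map_append]
    simp only [List.map_cons, List.map_nil, bEndsLO, List.getLast?_concat]
    simp [endOp_eq_op, ← kind_LO x]

-- chained ifs with the same result collapse to a disjunction
theorem if_chain (c1 c2 : Bool) (p3 p4 : Prop) [Decidable p3] [Decidable p4] :
    (if c1 = true then some "Error"
     else if c2 = true then some "Error"
     else if p3 then some "Error"
     else if p4 then some "Error" else none) =
    (if (c1 || c2 || decide p3 || decide p4) = true then some "Error"
     else (none : Option String)) := by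
  cases c1 <;> cases c2 <;> by_cases h3 : p3 <;> by_cases h4 : p4 <;> simp [h3, h4]

theorem check_error_eq (arr : List String) : check_error arr = check_error_alt arr := by
  rw [check_error, aLoop_eq_loopS, List.drop_zero, loopS_char]
  simp only [Nat.zero_add]
  rw [if_chain]
  have hN : arr.countP (fun x => bKind x == 'N') =
      arr.countP (fun x => PySem.Str.strIsdigit x) :=
    List.countP_congr (fun a _ => by rw [kind_N])
  have hL : arr.countP (fun x => bKind x == 'L') =
      arr.countP (fun x => aIsLogical x) :=
    List.countP_congr (fun a _ => by rw [kind_L])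
  simp only [check_error_alt, hasNN_eq, endsLO_eq, count_code, countP_op_split, hN, hL]

-- ===== VERDICT (by name: the statement is the Claim_ definition above) =====
theorem check_error_spec : Claim_equal_check_error := by
  intro arr _
  exact check_error_eq arr
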